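-- pv_equiv track=rewrite | github.com/kmm2908/seomachine | src/api/routers/citations.py | _summarise_sites
-- ===== SOURCE A (Python) =====
-- def _summarise_sites(sites: dict) -> dict:
--     counts = {"listed": 0, "not_found": 0, "pending_verification": 0, "manual_required": 0, "total": 0}
--     for site in sites.values():
--         counts["total"] += 1
--         status = site.get("status", "")
--         submit = site.get("submit_status", "")
--         if status == "found":
--             counts["listed"] += 1
--         elif status == "not_found":
--             counts["not_found"] += 1
--         if submit == "pending_verification":
--             counts["pending_verification"] += 1
--         if submit == "manual_required":
--             counts["manual_required"] += 1
--     return counts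
-- ===== SOURCE B (Python) =====
-- def _summarise_sites(sites: dict) -> dict:
--     statuses = [site.get("status", "") for site in sites.values()]
--     submits = [site.get("submit_status", "") for site in sites.values()]
--     return {
--         "listed": statuses.count("found"),
--         "not_found": statuses.count("not_found"),
--         "pending_verification": submits.count("pending_verification"),
--         "manual_required": submits.count("manual_required"),
--         "total": len(sites),
--     }
-- ===== Notes on version B (the rewrite author's own statement) =====
-- stated objective: idiomatic
-- what changed: Replaces A's single branchy accumulating loop over a mutable counts dict by projecting the status/submit_status fields into two lists and assembling the result dict directly from .count() lookups and len(sites).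
import Mathlib
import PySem

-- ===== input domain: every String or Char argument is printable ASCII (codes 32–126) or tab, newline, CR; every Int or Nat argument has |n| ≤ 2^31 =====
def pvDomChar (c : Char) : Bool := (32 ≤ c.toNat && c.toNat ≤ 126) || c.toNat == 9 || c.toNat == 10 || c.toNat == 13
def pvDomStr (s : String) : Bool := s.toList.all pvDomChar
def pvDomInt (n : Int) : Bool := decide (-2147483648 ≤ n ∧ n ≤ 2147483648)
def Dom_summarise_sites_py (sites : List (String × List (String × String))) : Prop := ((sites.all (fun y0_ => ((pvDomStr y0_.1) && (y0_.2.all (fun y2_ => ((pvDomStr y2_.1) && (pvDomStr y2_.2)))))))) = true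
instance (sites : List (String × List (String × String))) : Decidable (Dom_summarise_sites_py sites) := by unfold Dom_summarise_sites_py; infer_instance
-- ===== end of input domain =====

-- B replaces A's branchy accumulating loop over a mutable counts dict by two projected
-- field lists whose .count() lookups (plus len) assemble the result directly (idiomatic).

-- ===== PORT A =====
-- one iteration of A's for-loop body over a site dict
def pvStepA (counts : PySem.Dict String Int) (site : List (String × String)) : PySem.Dict String Int :=
  let counts := counts.modify "total" 0 (· + 1)
  let status := (PySem.Dict.ofList site).getD "status" ""
  let submit := (PySem.Dict.ofList site).getD "submit_status" ""
  let counts :=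
    if status == "found" then counts.modify "listed" 0 (· + 1)
    else if status == "not_found" then counts.modify "not_found" 0 (· + 1)
    else counts
  let counts := if submit == "pending_verification" then counts.modify "pending_verification" 0 (· + 1) else counts
  if submit == "manual_required" then counts.modify "manual_required" 0 (· + 1) else counts

def summarise_sites_py (sites : List (String × List (String × String))) : List (String × Int) :=
  (sites.foldl (fun counts p => pvStepA counts p.2)
    (PySem.Dict.mk [("listed", 0), ("not_found", 0), ("pending_verification", 0), ("manual_required", 0), ("total", 0)])).items

-- ===== PORT B =====
def summarise_sites_py_alt (sites : List (String × List (String × String))) : List (String × Int) :=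
  let statuses := sites.map (fun p => (PySem.Dict.ofList p.2).getD "status" "")
  let submits := sites.map (fun p => (PySem.Dict.ofList p.2).getD "submit_status" "")
  [("listed", (statuses.count "found" : Int)),
   ("not_found", (statuses.count "not_found" : Int)),
   ("pending_verification", (submits.count "pending_verification" : Int)),
   ("manual_required", (submits.count "manual_required" : Int)),
   ("total", (sites.length : Int))]

-- ===== PRECONDITION & SPEC =====
def Spec_summarise_sites_py (sites : List (String × List (String × String))) (out : List (String × Int)) : Prop := out = summarise_sites_py_alt sites
instance (sites : List (String × List (String × String))) (out : List (String × Int)) : Decidable (Spec_summarise_sites_py sites out) := by unfold Spec_summarise_sites_py; infer_instance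

-- ===== CLAIM (what is proved, stated in full; the proofs are below) =====
def Claim_equal_summarise_sites_py : Prop := ∀ (sites : List (String × List (String × String))), Dom_summarise_sites_py sites → Spec_summarise_sites_py sites (summarise_sites_py sites)

-- ===== LEMMAS AND PROOFS =====

-- loop invariant: A's fold over any start values adds B's per-field counts
lemma pv_loopA (l : List (String × List (String × String))) (a b p m t : Int) :
    (l.foldl (fun counts q => pvStepA counts q.2)
      (PySem.Dict.mk [("listed", a), ("not_found", b), ("pending_verification", p), ("manual_required", m), ("total", t)])).items
    = [("listed", a + ((l.map (fun q => (PySem.Dict.ofList q.2).getD "status" "")).count "found" : Nat)),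
       ("not_found", b + ((l.map (fun q => (PySem.Dict.ofList q.2).getD "status" "")).count "not_found" : Nat)),
       ("pending_verification", p + ((l.map (fun q => (PySem.Dict.ofList q.2).getD "submit_status" "")).count "pending_verification" : Nat)),
       ("manual_required", m + ((l.map (fun q => (PySem.Dict.ofList q.2).getD "submit_status" "")).count "manual_required" : Nat)),
       ("total", t + (l.length : Nat))] := by
  induction l generalizing a b p m t with
  | nil => simp
  | cons x xs ih =>
    simp only [List.foldl_cons, List.map_cons, List.count_cons, List.length_cons]
    have hstep : pvStepA (PySem.Dict.mk [("listed", a), ("not_found", b), ("pending_verification", p), ("manual_required", m), ("total", t)]) x.2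
        = PySem.Dict.mk [("listed", a + if (PySem.Dict.ofList x.2).getD "status" "" = "found" then 1 else 0),
            ("not_found", b + if (PySem.Dict.ofList x.2).getD "status" "" = "not_found" then 1 else 0),
            ("pending_verification", p + if (PySem.Dict.ofList x.2).getD "submit_status" "" = "pending_verification" then 1 else 0),
            ("manual_required", m + if (PySem.Dict.ofList x.2).getD "submit_status" "" = "manual_required" then 1 else 0),
            ("total", t + 1)] := by
      unfold pvStepA
      split_ifs <;>
        simp_all [PySem.Dict.modify, PySem.Dict.getD, PySem.Dict.get?_mk_cons, PySem.Dict.insert]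
    rw [hstep, ih]
    simp only [List.cons.injEq, Prod.mk.injEq, true_and, and_true]
    refine ⟨?_, ?_, ?_, ?_, ?_⟩ <;> push_cast <;> (try split_ifs <;> simp_all [beq_iff_eq]) <;> omega

-- ===== VERDICT =====
theorem summarise_sites_py_spec : Claim_equal_summarise_sites_py := by
  intro sites _
  unfold Spec_summarise_sites_py summarise_sites_py summarise_sites_py_alt
  rw [pv_loopA]
  simp
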